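-- pv_equiv track=rewrite | github.com/jiiyeon/Algorithm_Prac | stage05/06.py | ox_count
-- ===== SOURCE A (Python) =====
-- def ox_count(string) :
--     n = len(string)
--     str_list = list(string)
--
--     i = 0
--     j = 0
--     sum = 0
--     while (i < n) :
--         if (str_list[i] == "O") :
--             j += 1
--             sum += j
--         else :
--             j = 0
--         i += 1
--
--     return(sum)
-- ===== SOURCE B (Python) =====
-- from itertools import groupby
--
-- def ox_count(string):
--     total = 0
--     for key, group in groupby(string):
--         if key == "O":
--             L = sum(1 for _ in group)
--             total += L * (L + 1) // 2
--     return total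
-- ===== Notes on version B (the rewrite author's own statement) =====
-- stated objective: alternative
-- what changed: Replaces the per-character running-streak counter with run-length grouping (itertools.groupby) plus the triangular-number closed form L*(L+1)//2 per maximal O-run
import Mathlib
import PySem

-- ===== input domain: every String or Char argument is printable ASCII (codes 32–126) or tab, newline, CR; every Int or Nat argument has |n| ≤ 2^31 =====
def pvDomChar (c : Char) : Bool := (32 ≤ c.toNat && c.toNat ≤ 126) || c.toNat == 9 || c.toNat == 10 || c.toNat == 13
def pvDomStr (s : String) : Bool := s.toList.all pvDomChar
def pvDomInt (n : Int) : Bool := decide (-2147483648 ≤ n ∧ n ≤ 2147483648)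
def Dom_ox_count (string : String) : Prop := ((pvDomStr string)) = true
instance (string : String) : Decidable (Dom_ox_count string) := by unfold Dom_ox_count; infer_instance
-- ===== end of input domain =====

-- B replaces A's per-character running-streak counter by run-length grouping with the
-- triangular closed form L*(L+1)//2 per maximal 'O'-run (objective: alternative).

-- ===== PORT A =====
-- while loop over str_list with state (j, sum); the index i just walks the list, so it
-- becomes a left fold over the character list with the same (j, sum) state.
def oxStepA (p : Int × Int) (c : Char) : Int × Int :=
  if c = 'O' then (p.1 + 1, p.2 + (p.1 + 1)) else (0, p.2)

def ox_count (string : String) : Int :=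
  (string.toList.foldl oxStepA (0, 0)).2

-- ===== PORT B =====
-- groupby: peel off the maximal run of the leading character, add its triangular number
-- if the key is 'O', recurse on the remainder (Source B's groupby loop).
def oxRuns : List Char → Int
  | [] => 0
  | c :: rest =>
      let L : Int := 1 + (rest.takeWhile (· = c)).length
      (if c = 'O' then PySem.Int.floordiv (L * (L + 1)) 2 else 0)
        + oxRuns (rest.dropWhile (· = c))
termination_by l => l.length
decreasing_by
  simpa using Nat.lt_succ_of_le (List.length_dropWhile_le (· = c) rest)

def ox_count_alt (string : String) : Int := oxRuns string.toList

-- ===== PRECONDITION & SPEC =====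
def Spec_ox_count (string : String) (out : Int) : Prop := out = ox_count_alt string
instance (string : String) (out : Int) : Decidable (Spec_ox_count string out) := by unfold Spec_ox_count; infer_instance

-- ===== CLAIM (what is proved, stated in full; the proofs are below) =====
def Claim_equal_ox_count : Prop := ∀ (string : String), Dom_ox_count string → Spec_ox_count string (ox_count string)

-- ===== LEMMAS AND PROOFS =====

-- triangular number over Nat (exact, since k*(k+1) is even)
def triN (k : Nat) : Int := ((k * (k + 1) / 2 : Nat) : Int)

theorem triN_succ (k : Nat) : triN (k + 1) = triN k + (k + 1) := by
  unfold triN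
  have h : (k + 1) * (k + 2) / 2 = k * (k + 1) / 2 + (k + 1) := by
    have he : 2 ∣ k * (k + 1) := (Nat.even_mul_succ_self k).two_dvd
    obtain ⟨m, hm⟩ := he
    have : (k + 1) * (k + 2) = 2 * (m + (k + 1)) := by
      have hx : (k + 1) * (k + 2) = k * (k + 1) + 2 * (k + 1) := by ring
      rw [hx, hm]; ring
    rw [hm, this, Nat.mul_div_cancel_left _ (by norm_num), Nat.mul_div_cancel_left _ (by norm_num)]
  push_cast [h]
  ring

theorem triN_floordiv (k : Nat) :
    PySem.Int.floordiv ((1 + (k : Int)) * ((1 + (k : Int)) + 1)) 2 = triN (k + 1) := by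
  have : (1 + (k : Int)) * ((1 + (k : Int)) + 1) = (((k + 1) * (k + 2) : Nat) : Int) := by
    push_cast; ring
  rw [this]
  rw [show ((2 : Int)) = ((2 : Nat) : Int) from rfl, PySem.Int.floordiv_natCast]
  rfl

-- folding A's step over a run of 'O's of length n from state (j, s)
theorem foldA_O_run (l : List Char) (h : ∀ c ∈ l, c = 'O') (j s : Int) :
    l.foldl oxStepA (j, s) =
      (j + l.length, s + l.length * j + triN l.length) := by
  induction l generalizing j s with
  | nil => simp [triN]
  | cons c t ih =>
      have hc : c = 'O' := h c (by simp)
      have ht : ∀ c ∈ t, c = 'O' := fun c hm => h c (by simp [hm])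
      simp only [List.foldl_cons, oxStepA, hc]
      rw [ih ht]
      refine Prod.ext ?_ ?_
      · simp; ring
      · simp only [List.length_cons, triN_succ]
        push_cast
        ring

theorem oxRuns_cons_ne (c : Char) (rest : List Char) (hc : c ≠ 'O') :
    oxRuns (c :: rest) = oxRuns rest := by
  rw [oxRuns]
  simp only [if_neg hc, zero_add]
  cases rest with
  | nil => simp
  | cons d t =>
      by_cases hd : d = c
      · subst hd
        rw [oxRuns]
        simp [if_neg hc]
      · rw [List.dropWhile_cons_of_neg (by simp [hd])]

-- main invariant: fold from (0, s) equals s + run-based triangular sum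
theorem foldA_eq_runs (n : Nat) :
    ∀ l : List Char, l.length ≤ n → ∀ s : Int,
      (l.foldl oxStepA (0, s)).2 = s + oxRuns l := by
  induction n with
  | zero =>
      intro l hl s
      have : l = [] := List.eq_nil_of_length_eq_zero (Nat.le_zero.mp hl)
      simp [this, oxRuns]
  | succ n ih =>
      intro l hl s
      cases l with
      | nil => simp [oxRuns]
      | cons c rest =>
          by_cases hc : c = 'O'
          · subst hc
            -- split rest into its leading 'O'-run and the tail
            have hsplit : rest = rest.takeWhile (· = 'O') ++ rest.dropWhile (· = 'O') :=
              (List.takeWhile_append_dropWhile (p := (· = 'O')) (l := rest)).symm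
            set run := rest.takeWhile (· = 'O') with hrun
            set tail := rest.dropWhile (· = 'O') with htail
            have hrunO : ∀ x ∈ run, x = 'O' := by
              intro x hx
              have := List.mem_takeWhile_imp (hrun ▸ hx)
              simpa using this
            have hfold : ('O' :: rest).foldl oxStepA (0, s)
                = tail.foldl oxStepA (('O' :: run).foldl oxStepA (0, s)) := by
              conv_lhs => rw [show ('O' :: rest) = ('O' :: run) ++ tail by rw [List.cons_append, ← hsplit]]
              rw [List.foldl_append]
            have hrunAll : ∀ x ∈ ('O' :: run), x = 'O' := by
              intro x hx
              rcases List.mem_cons.mp hx with h | h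
              · exact h
              · exact hrunO x h
            rw [hfold, foldA_O_run _ hrunAll]
            have hL : (('O' :: run).length : Int) = 1 + (run.length : Int) := by
              simp; ring
            -- value of oxRuns on the whole string
            have hruns : oxRuns ('O' :: rest)
                = triN (run.length + 1) + oxRuns tail := by
              rw [oxRuns]
              simp only [← hrun, ← htail]
              congr 1
              exact triN_floordiv run.length
            rw [hruns]
            -- tail is empty or starts with a non-'O'
            cases htl : tail with
            | nil =>
                simp [oxRuns]
            | cons d t =>
                have hd : d ≠ 'O' := by
                  have := List.head?_dropWhile_not (p := (· = 'O')) (l := rest)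
                  rw [← htail, htl] at this
                  simpa using this
                simp only [List.foldl_cons, oxStepA, if_neg hd]
                have ht_le : t.length ≤ n := by
                  have h1 : ('O' :: rest).length ≤ n + 1 := hl
                  have h2 : rest.length = run.length + tail.length := by
                    rw [hsplit, List.length_append]
                  rw [htl] at h2
                  simp at h1 h2 ⊢
                  omega
                rw [ih t ht_le]
                rw [oxRuns_cons_ne d t hd]
                simp only [List.length_cons]
                ring
          · simp only [List.foldl_cons, oxStepA, if_neg hc]
            rw [ih rest (by simpa using Nat.lt_succ_iff.mp (Nat.lt_of_lt_of_le (by simp) hl)) s]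
            rw [oxRuns_cons_ne c rest hc]

-- ===== VERDICT (by name: the statement is the Claim_ definition above) =====
theorem ox_count_spec : Claim_equal_ox_count := by
  intro string _
  unfold Spec_ox_count ox_count ox_count_alt
  have := foldA_eq_runs string.toList.length string.toList (le_refl _) 0
  rw [this, zero_add]
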